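-- pv_equiv track=rewrite | github.com/paive/AMR2TEXT | src/instance.py | build_node_aligns
-- ===== SOURCE A (Python) =====
-- def build_node_aligns(nodes, linear_amr_tokens):
--     aligns = []
--     la_index = 0
--     for idx, node in enumerate(nodes):
--         if node == 'gnode':
--             aligns.append(len(linear_amr_tokens) - 1)
--             break
--         while (la_index < len(linear_amr_tokens)) and (linear_amr_tokens[la_index] != node):
--             la_index += 1
--         aligns.append(la_index)
--     assert len(aligns) == len(nodes)
--     return aligns
-- ===== SOURCE B (Python) =====
-- def _bisect_left(ps, x):
--     lo, hi = 0, len(ps)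
--     while lo < hi:
--         mid = (lo + hi) // 2
--         if ps[mid] < x:
--             lo = mid + 1
--         else:
--             hi = mid
--     return lo
--
--
-- def build_node_aligns(nodes, linear_amr_tokens):
--     positions = {}
--     for i, tok in enumerate(linear_amr_tokens):
--         positions.setdefault(tok, []).append(i)
--     n = len(linear_amr_tokens)
--     aligns = []
--     la_index = 0
--     for node in nodes:
--         if node == 'gnode':
--             aligns.append(n - 1)
--             break
--         ps = positions.get(node, [])
--         j = _bisect_left(ps, la_index)
--         la_index = ps[j] if j < len(ps) else n
--         aligns.append(la_index)
--     assert len(aligns) == len(nodes)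
--     return aligns
-- ===== Notes on version B (the rewrite author's own statement) =====
-- stated objective: alternative
-- what changed: Replaces the single forward-scanning pointer over the token list with a token->sorted-positions index built in one pass, resolving each node by binary search (hand-written bisect_left) for the first occurrence at or after the running lower bound.
import Mathlib
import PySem

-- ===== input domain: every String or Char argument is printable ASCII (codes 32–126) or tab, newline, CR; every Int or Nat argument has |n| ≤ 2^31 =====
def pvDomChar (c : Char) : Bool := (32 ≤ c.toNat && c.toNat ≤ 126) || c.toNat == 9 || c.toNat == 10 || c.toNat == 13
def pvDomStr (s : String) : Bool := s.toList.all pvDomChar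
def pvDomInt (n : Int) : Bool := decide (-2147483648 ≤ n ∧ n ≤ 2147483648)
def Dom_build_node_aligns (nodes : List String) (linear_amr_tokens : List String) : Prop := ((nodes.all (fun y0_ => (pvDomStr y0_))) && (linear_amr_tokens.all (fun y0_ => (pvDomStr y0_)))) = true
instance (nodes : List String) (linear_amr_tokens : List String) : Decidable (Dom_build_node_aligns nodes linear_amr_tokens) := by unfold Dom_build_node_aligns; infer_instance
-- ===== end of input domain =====

-- B replaces A's forward-scanning pointer over the tokens with a token→positions index plus
-- binary search; equal return values are proved on Pre_ (where A's assert does not fire).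

-- ===== PORT A =====
-- the inner while loop: advance la while la < len(tokens) and tokens[la] != node
def scanA (ts : List String) (node : String) (la : Nat) : Nat :=
  if h : la < ts.length ∧ ts.getD la "" ≠ node then scanA ts node (la + 1) else la
termination_by ts.length - la
decreasing_by omega

-- the for loop over nodes, threading la_index; the 'gnode' branch appends len-1 and breaks
def goA (ts : List String) : List String → Nat → List Int
  | [], _ => []
  | node :: rest, la =>
    if node = "gnode" then [(ts.length : Int) - 1]
    else
      let la' := scanA ts node la
      (la' : Int) :: goA ts rest la'

def build_node_aligns (nodes : List String) (linear_amr_tokens : List String) : List Int :=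
  goA linear_amr_tokens nodes 0

-- ===== PORT B =====
-- positions.setdefault(tok, []).append(i) over enumerate(linear_amr_tokens)
def buildPos : List String → Nat → PySem.Dict String (List Nat) → PySem.Dict String (List Nat)
  | [], _, d => d
  | t :: rest, i, d => buildPos rest (i + 1) (d.insert t (d.getD t [] ++ [i]))

-- hand-written bisect_left from Source B
def bl (ps : List Nat) (x : Nat) (lo hi : Nat) : Nat :=
  if h : lo < hi then
    let mid := (lo + hi) / 2
    if ps.getD mid 0 < x then bl ps x (mid + 1) hi else bl ps x lo mid
  else lo
termination_by hi - lo
decreasing_by all_goals omega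

-- the for loop of B
def goB (n : Nat) (pos : PySem.Dict String (List Nat)) : List String → Nat → List Int
  | [], _ => []
  | node :: rest, la =>
    if node = "gnode" then [(n : Int) - 1]
    else
      let ps := pos.getD node []
      let j := bl ps la 0 ps.length
      let la' := if j < ps.length then ps.getD j 0 else n
      (la' : Int) :: goB n pos rest la'

def build_node_aligns_alt (nodes : List String) (linear_amr_tokens : List String) : List Int :=
  goB linear_amr_tokens.length (buildPos linear_amr_tokens 0 PySem.Dict.empty) nodes 0

-- ===== PRECONDITION & SPEC =====
-- Pre_ excludes exactly the inputs where 'gnode' occurs before the last node: there A's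
-- break leaves aligns shorter than nodes and the assert raises AssertionError.
def Pre_build_node_aligns (nodes : List String) (linear_amr_tokens : List String) : Prop :=
  "gnode" ∉ nodes.dropLast
instance (nodes : List String) (linear_amr_tokens : List String) : Decidable (Pre_build_node_aligns nodes linear_amr_tokens) := by unfold Pre_build_node_aligns; infer_instance

def pvWitness_build_node_aligns : List String × List String := (["a", "b", "gnode"], ["x", "a", "b"])

def Spec_build_node_aligns (nodes : List String) (linear_amr_tokens : List String) (out : List Int) : Prop := out = build_node_aligns_alt nodes linear_amr_tokens
instance (nodes : List String) (linear_amr_tokens : List String) (out : List Int) : Decidable (Spec_build_node_aligns nodes linear_amr_tokens out) := by unfold Spec_build_node_aligns; infer_instance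

-- ===== CLAIM (what is proved, stated in full; the proofs are below) =====
def Claim_equal_build_node_aligns : Prop := ∀ (nodes : List String) (linear_amr_tokens : List String), Dom_build_node_aligns nodes linear_amr_tokens → Pre_build_node_aligns nodes linear_amr_tokens → Spec_build_node_aligns nodes linear_amr_tokens (build_node_aligns nodes linear_amr_tokens)

-- ===== LEMMAS AND PROOFS =====

-- the positions that the index assigns to key k, starting at offset i
def posSpec : List String → Nat → String → List Nat
  | [], _, _ => []
  | t :: rest, i, k => (if t = k then [i] else []) ++ posSpec rest (i + 1) k

theorem buildPos_getD (ts : List String) (i : Nat) (d : PySem.Dict String (List Nat)) (k : String) :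
    (buildPos ts i d).getD k [] = d.getD k [] ++ posSpec ts i k := by
  induction ts generalizing i d with
  | nil => simp [buildPos, posSpec]
  | cons t rest ih =>
    simp only [buildPos, posSpec, ih, PySem.Dict.getD_insert]
    by_cases h : k = t
    · subst h; simp
    · have h' : ¬ t = k := fun e => h e.symm
      simp [h, h']

theorem posSpec_mem (ts : List String) (i : Nat) (k : String) (p : Nat) :
    p ∈ posSpec ts i k ↔ i ≤ p ∧ p < i + ts.length ∧ ts.getD (p - i) "" = k := by
  induction ts generalizing i with
  | nil => simp [posSpec]; omega
  | cons t rest ih =>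
    simp only [posSpec, List.mem_append, ih]
    by_cases h : t = k
    · subst h
      constructor
      · rintro (hp | ⟨h1, h2, h3⟩)
        · simp at hp
          subst hp
          exact ⟨le_rfl, by simp, by simp⟩
        · refine ⟨by omega, by simp; omega, ?_⟩
          have : p - i = (p - (i + 1)) + 1 := by omega
          rw [this]; simpa using h3
      · rintro ⟨h1, h2, h3⟩
        by_cases hpi : p = i
        · left; simp [hpi]
        · right
          refine ⟨by omega, by simp at h2 ⊢; omega, ?_⟩
          have : p - i = (p - (i + 1)) + 1 := by omega
          rw [this] at h3; simpa using h3
    · simp only [if_neg h, List.not_mem_nil, false_or, List.length_cons]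
      constructor
      · rintro ⟨h1, h2, h3⟩
        refine ⟨by omega, by omega, ?_⟩
        have : p - i = (p - (i + 1)) + 1 := by omega
        rw [this]; simpa using h3
      · rintro ⟨h1, h2, h3⟩
        have hpi : p ≠ i := by
          intro hh; subst hh; simp at h3; exact h h3
        refine ⟨by omega, by omega, ?_⟩
        have : p - i = (p - (i + 1)) + 1 := by omega
        rw [this] at h3; simpa using h3

theorem posSpec_sorted (ts : List String) (i : Nat) (k : String) :
    (posSpec ts i k).Pairwise (· < ·) := by
  induction ts generalizing i with
  | nil => simp [posSpec]
  | cons t rest ih =>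
    simp only [posSpec]
    refine List.pairwise_append.2 ⟨?_, ih (i + 1), ?_⟩
    · split <;> simp
    · intro a ha b hb
      have := ((posSpec_mem rest (i + 1) k b).1 hb).1
      split at ha
      · simp at ha; omega
      · simp at ha

theorem sorted_getD_mono (ps : List Nat) (h : ps.Pairwise (· ≤ ·)) (i j : Nat)
    (hij : i ≤ j) (hj : j < ps.length) : ps.getD i 0 ≤ ps.getD j 0 := by
  rcases Nat.lt_or_ge i j with hlt | hge
  · rw [List.getD_eq_getElem ps 0 (by omega), List.getD_eq_getElem ps 0 hj]
    exact List.pairwise_iff_getElem.1 h i j (by omega) hj hlt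
  · have : i = j := by omega
    subst this; rfl

-- bisect_left invariant: the result j is ≤ len, everything before j is < x,
-- and the element at j (if any) is ≥ x
theorem bl_inv (ps : List Nat) (hs : ps.Pairwise (· ≤ ·)) (x : Nat) :
    ∀ fuel lo hi, hi - lo ≤ fuel → lo ≤ hi → hi ≤ ps.length →
    (∀ idx, idx < lo → ps.getD idx 0 < x) →
    (∀ idx, hi ≤ idx → idx < ps.length → x ≤ ps.getD idx 0) →
    (bl ps x lo hi ≤ ps.length) ∧
    (∀ idx, idx < bl ps x lo hi → ps.getD idx 0 < x) ∧
    (bl ps x lo hi < ps.length → x ≤ ps.getD (bl ps x lo hi) 0) := by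
  intro fuel
  induction fuel with
  | zero =>
    intro lo hi hfuel hle hhi hlo hge
    have : lo = hi := by omega
    subst this
    rw [bl]; simp only [lt_irrefl, dite_false]
    exact ⟨by omega, hlo, fun h => hge lo le_rfl h⟩
  | succ f ih =>
    intro lo hi hfuel hle hhi hlo hge
    rw [bl]
    by_cases h : lo < hi
    · simp only [dif_pos h]
      set mid := (lo + hi) / 2 with hmid
      have hm1 : lo ≤ mid := by omega
      have hm2 : mid < hi := by omega
      by_cases hc : ps.getD mid 0 < x
      · simp only [if_pos hc]
        exact ih (mid + 1) hi (by omega) (by omega) hhi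
          (fun idx hidx => lt_of_le_of_lt
            (sorted_getD_mono ps hs idx mid (by omega) (by omega)) hc) hge
      · simp only [if_neg hc]
        exact ih lo mid (by omega) (by omega) (by omega) hlo
          (fun idx hidx hlen => le_trans (by omega)
            (sorted_getD_mono ps hs mid idx hidx hlen))
    · simp only [dif_neg h]
      have : lo = hi := by omega
      subst this
      exact ⟨by omega, hlo, fun hh => hge lo le_rfl hh⟩

-- properties of the inner while loop of A
theorem scanA_props (ts : List String) (k : String) :
    ∀ fuel la, ts.length - la ≤ fuel → la ≤ ts.length →
    la ≤ scanA ts k la ∧ scanA ts k la ≤ ts.length ∧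
    (∀ j, la ≤ j → j < scanA ts k la → ts.getD j "" ≠ k) ∧
    (scanA ts k la < ts.length → ts.getD (scanA ts k la) "" = k) := by
  intro fuel
  induction fuel with
  | zero =>
    intro la hfuel hla
    have : la = ts.length := by omega
    rw [scanA]
    have : ¬ (la < ts.length ∧ ts.getD la "" ≠ k) := by omega
    simp only [dif_neg this]
    exact ⟨le_rfl, hla, fun j h1 h2 => absurd h2 (by omega), fun h => by omega⟩
  | succ f ih =>
    intro la hfuel hla
    rw [scanA]
    by_cases h : la < ts.length ∧ ts.getD la "" ≠ k
    · simp only [dif_pos h]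
      obtain ⟨r1, r2, r3, r4⟩ := ih (la + 1) (by omega) (by omega)
      refine ⟨by omega, r2, ?_, r4⟩
      intro j hj1 hj2
      rcases Nat.eq_or_lt_of_le hj1 with heq | hlt
      · subst heq; exact h.2
      · exact r3 j hlt hj2
    · simp only [dif_neg h]
      refine ⟨le_rfl, hla, fun j h1 h2 => absurd h2 (by omega), ?_⟩
      intro hlt
      by_contra hne
      exact h ⟨hlt, hne⟩

-- the two inner computations agree: A's scan = B's index lookup + bisect
theorem step_eq (ts : List String) (k : String) (la : Nat) (hla : la ≤ ts.length) :
    scanA ts k la =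
      (if bl (posSpec ts 0 k) la 0 (posSpec ts 0 k).length < (posSpec ts 0 k).length
       then (posSpec ts 0 k).getD (bl (posSpec ts 0 k) la 0 (posSpec ts 0 k).length) 0
       else ts.length) := by
  set ps := posSpec ts 0 k with hps
  have hsorted : ps.Pairwise (· < ·) := posSpec_sorted ts 0 k
  have hsorted' : ps.Pairwise (· ≤ ·) := hsorted.imp (fun h => Nat.le_of_lt h)
  have hmem : ∀ p, p ∈ ps ↔ p < ts.length ∧ ts.getD p "" = k := by
    intro p
    rw [hps, posSpec_mem]
    simp
  obtain ⟨j1, j2, j3⟩ := bl_inv ps hsorted' la ps.length 0 ps.length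
    (by omega) (by omega) le_rfl (by omega) (by omega)
  set j := bl ps la 0 ps.length with hj
  obtain ⟨s1, s2, s3, s4⟩ := scanA_props ts k (ts.length - la) la le_rfl hla
  set r := scanA ts k la with hr
  -- value computed by B
  by_cases hjl : j < ps.length
  · rw [if_pos hjl]
    set v := ps.getD j 0 with hv
    have hvmem : v ∈ ps := by
      rw [hv, List.getD_eq_getElem ps 0 hjl]; exact List.getElem_mem _
    have hvtok := (hmem v).1 hvmem
    have hvge : la ≤ v := j3 hjl
    -- v is minimal among positions ≥ la: any p ∈ ps with la ≤ p has v ≤ p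
    have hmin : ∀ p, p ∈ ps → la ≤ p → v ≤ p := by
      intro p hp hlap
      obtain ⟨idx, hidx, hidxv⟩ := List.getElem_of_mem hp
      have hidx' : ps.getD idx 0 = p := by rw [List.getD_eq_getElem ps 0 hidx, hidxv]
      by_cases hij : idx < j
      · have := j2 idx hij; omega
      · rw [← hidx']
        exact sorted_getD_mono ps hsorted' j idx (by omega) hidx
    -- now r = v by antisymmetry of the minimality characterisations
    rcases Nat.lt_trichotomy r v with hlt | heq | hgt
    · exfalso
      have hrlen : r < ts.length := by omega
      have : r ∈ ps := (hmem r).2 ⟨hrlen, s4 hrlen⟩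
      have := hmin r this s1; omega
    · exact heq
    · exfalso
      exact s3 v hvge (by omega) hvtok.2
  · rw [if_neg hjl]
    -- no position ≥ la exists: all elements of ps are < la
    have hall : ∀ p, p ∈ ps → p < la := by
      intro p hp
      obtain ⟨idx, hidx, hidxv⟩ := List.getElem_of_mem hp
      have : ps.getD idx 0 = p := by rw [List.getD_eq_getElem ps 0 hidx, hidxv]
      have := j2 idx (by omega)
      omega
    by_contra hne
    have hrlen : r < ts.length := by omega
    have : r ∈ ps := (hmem r).2 ⟨hrlen, s4 hrlen⟩
    have := hall r this
    omega

theorem go_eq (ts : List String) (nodes : List String) :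
    ∀ la, la ≤ ts.length →
    goA ts nodes la = goB ts.length (buildPos ts 0 PySem.Dict.empty) nodes la := by
  induction nodes with
  | nil => intro la _; rfl
  | cons node rest ih =>
    intro la hla
    by_cases hg : node = "gnode"
    · simp [goA, goB, hg]
    · simp only [goA, goB, if_neg hg]
      have hps : (buildPos ts 0 PySem.Dict.empty).getD node [] = posSpec ts 0 node := by
        rw [buildPos_getD]; simp
      rw [hps]
      rw [← step_eq ts node la hla]
      have hle : scanA ts node la ≤ ts.length :=
        (scanA_props ts node (ts.length - la) la le_rfl hla).2.1
      rw [ih (scanA ts node la) hle]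

-- ===== VERDICT (by name: the statement is the Claim_ definition above) =====
theorem build_node_aligns_spec : Claim_equal_build_node_aligns := by
  intro nodes linear_amr_tokens _ _
  unfold Spec_build_node_aligns build_node_aligns build_node_aligns_alt
  exact go_eq linear_amr_tokens nodes 0 (by omega)
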